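-- pv_equiv track=rewrite | github.com/icecream126/drugmechdb_moa_prediction | src/drugmechcf/llmx/text.py | generate_alt_names
-- ===== SOURCE A (Python) =====
-- def generate_alt_names(sttdized_name: str, is_sub_call=False) -> list[str]:
--     """
--     Call after `parse_standardize_name`, to generate a list of alternative names.
--     All this does is replace any hyphen ('-') with SPACE or Empty String.
--
--     The goal is to be comprehensive, so alt_names may not be always be valid names.
--
--     :param sttdized_name: The name
--     :param is_sub_call: For internal use only.
--         Recursive calls set this to True.
--     """
--
--     hidx = sttdized_name.find('-', 1)
--
--     if hidx < 0 or hidx == len(sttdized_name) - 1: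
--         return [sttdized_name] if is_sub_call else []
--
--     alt_sfxs = generate_alt_names(sttdized_name[hidx + 1:], is_sub_call=True)
--
--     pfx = sttdized_name[: hidx]
--
--     alt_names = []
--     for char in ['-', ' ', '']:
--         for sfx in alt_sfxs:
--             if char == '' and pfx[-1].islower():
--                 sfx = sfx[0].lower() + sfx[1:]
--             alt_names.append(pfx + char + sfx)
--
--     if not is_sub_call and alt_names[0] == sttdized_name:
--         alt_names = alt_names[1:]
--
--     return alt_names
-- ===== SOURCE B (Python) =====
-- from itertools import product
--
--
-- def generate_alt_names(sttdized_name: str, is_sub_call=False) -> list[str]: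
--     # Collect split-point hyphens in one scan: first hyphen at index >= 1,
--     # resuming one char past each split; a hyphen that is the last character
--     # of the remaining text is not a split point.
--     splits = []
--     pos = 1
--     while True:
--         p = sttdized_name.find('-', pos)
--         if p < 0 or p == len(sttdized_name) - 1:
--             break
--         splits.append(p)
--         pos = p + 2
--
--     if not splits:
--         return [sttdized_name] if is_sub_call else []
--
--     # Segments between the split hyphens, and the char preceding each split.
--     segs = []
--     prev = 0
--     for p in splits:
--         segs.append(sttdized_name[prev:p])
--         prev = p + 1
--     segs.append(sttdized_name[prev:])
--     prevs = [sttdized_name[p - 1] for p in splits]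
--
--     alts = []
--     for combo in product(['-', ' ', ''], repeat=len(splits)):
--         out = segs[0]
--         for join, pc, seg in zip(combo, prevs, segs[1:]):
--             if join == '' and pc.islower():
--                 seg = seg[0].lower() + seg[1:]
--             out += join + seg
--         alts.append(out)
--
--     # The first combination (all '-') rebuilds the input verbatim; drop it at
--     # the top level.
--     return alts if is_sub_call else alts[1:]
-- ===== Notes on version B (the rewrite author's own statement) =====
-- stated objective: alternative
-- what changed: A builds the variants by recursing on the suffix after the first split hyphen; B is non-recursive: one scan collects all split-point hyphen indices, then the segments and preceding chars are precomputed and itertools.product enumerates the join choices directly.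
import Mathlib
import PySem

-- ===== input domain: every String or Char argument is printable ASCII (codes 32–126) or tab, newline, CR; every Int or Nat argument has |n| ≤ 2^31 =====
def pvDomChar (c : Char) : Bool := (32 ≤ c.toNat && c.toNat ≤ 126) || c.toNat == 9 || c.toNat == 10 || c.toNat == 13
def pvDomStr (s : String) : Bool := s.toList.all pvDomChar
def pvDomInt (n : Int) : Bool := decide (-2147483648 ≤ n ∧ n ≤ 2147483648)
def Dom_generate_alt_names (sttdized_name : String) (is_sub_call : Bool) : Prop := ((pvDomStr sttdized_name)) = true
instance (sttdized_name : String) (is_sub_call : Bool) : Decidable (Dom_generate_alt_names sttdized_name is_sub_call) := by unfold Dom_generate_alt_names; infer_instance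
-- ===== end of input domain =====

-- B replaces A's recursion by one iterative hyphen scan plus an itertools.product
-- enumeration of the join choices (alternative decomposition, same cost).


-- ===== PORT A =====
-- Strings are handled as code-point lists (the PySem convention); the wrapper
-- at the end converts.  This termination fact is cited by the ports' recursions.
theorem pvFindFrom_nat (s : List Char) (k : Nat) :
    PySem.Chars.findFrom s ['-'] (k : Int) none =
      if PySem.Chars.find (s.drop k) ['-'] = -1 then -1
      else (k : Int) + PySem.Chars.find (s.drop k) ['-'] := by
  by_cases hk : k ≤ s.length
  · exact PySem.Chars.findFrom_natCast s ['-'] k hk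
  · have hd : s.drop k = [] := List.drop_eq_nil_of_le (by omega)
    rw [hd]
    have hfind : PySem.Chars.find ([] : List Char) ['-'] = -1 := by decide
    rw [hfind]
    rw [if_pos rfl]
    unfold PySem.Chars.findFrom
    simp only
    rw [if_pos (by omega)]

-- when find succeeds: the result is a genuine index of a '-'
theorem pvFind_spec (t : List Char) (h : PySem.Chars.find t ['-'] ≠ -1) :
    0 ≤ PySem.Chars.find t ['-'] ∧ (PySem.Chars.find t ['-']).toNat < t.length ∧
      t[(PySem.Chars.find t ['-']).toNat]? = some '-' := by
  have hff : PySem.Chars.findFrom t ['-'] ((0 : Nat) : Int) none = PySem.Chars.find t ['-'] := by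
    simp [PySem.Chars.findFrom_zero]
  have hs := PySem.Chars.findFrom_natCast_spec t ['-'] 0 (Nat.zero_le _)
  rw [hff] at hs
  obtain ⟨h0, hpre, -⟩ := hs h
  have hne : t.drop (PySem.Chars.find t ['-']).toNat ≠ [] := by
    intro hnil; rw [hnil] at hpre; simp at hpre
  have hlt : (PySem.Chars.find t ['-']).toNat < t.length := by
    by_contra hge
    exact hne (List.drop_eq_nil_of_le (by omega))
  refine ⟨by exact_mod_cast h0, hlt, ?_⟩
  have : (t.drop (PySem.Chars.find t ['-']).toNat).head? = some '-' := by
    obtain ⟨r, hr⟩ := hpre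
    rw [← hr]; rfl
  rwa [List.head?_drop] at this

-- the while-loop's resume position strictly grows toward the end (termination)
theorem pvSplit_step_lt (s : List Char) (pos : Nat)
    (h : ¬ (PySem.Chars.findFrom s ['-'] (pos : Int) none < 0 ∨
      PySem.Chars.findFrom s ['-'] (pos : Int) none = PySem.Chars.len s - 1)) :
    s.length + 2 - ((PySem.Chars.findFrom s ['-'] (pos : Int) none).toNat + 2) < s.length + 2 - pos := by
  rw [pvFindFrom_nat] at h ⊢
  rw [PySem.Chars.len_eq] at h
  split at h
  · simp at h
  · rename_i hf
    obtain ⟨h0, hlt, _⟩ := pvFind_spec _ hf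
    rw [List.length_drop] at hlt
    push_neg at h
    split
    · rename_i hc; exact absurd hc hf
    · omega

-- slicing off hidx+1 chars shortens the list (used by both ports' termination)
theorem pvDrop_lt (s : List Char) (h : ¬ (PySem.Chars.findFrom s ['-'] 1 none < 0 ∨
    PySem.Chars.findFrom s ['-'] 1 none = PySem.Chars.len s - 1)) :
    (PySem.List.slice s (some (PySem.Chars.findFrom s ['-'] 1 none + 1)) none).length < s.length := by
  have h1 : ((1:Nat) : Int) = (1 : Int) := by norm_num
  rw [← h1, pvFindFrom_nat] at h ⊢
  rw [PySem.Chars.len_eq] at h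
  split at h
  · simp at h
  · rename_i hf
    obtain ⟨h0, hlt, _⟩ := pvFind_spec _ hf
    rw [List.length_drop] at hlt
    push_neg at h
    rw [if_neg hf]
    have : ((1:Nat):Int) + PySem.Chars.find (s.drop 1) ['-'] + ((1:Nat):Int) =
      (((PySem.Chars.find (s.drop 1) ['-']).toNat + 2 : Nat) : Int) := by push_cast; omega
    rw [this, PySem.List.slice_from_natCast, List.length_drop]
    omega

-- port of A: recursion on the name (as its code-point list)
def pvGanA (s : List Char) (is_sub : Bool) : List (List Char) :=
  let hidx := PySem.Chars.findFrom s ['-'] 1 none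
  if h : hidx < 0 ∨ hidx = PySem.Chars.len s - 1 then
    if is_sub then [s] else []
  else
    let alt_sfxs := pvGanA (PySem.List.slice s (some (hidx + 1)) none) true
    let pfx := PySem.List.slice s none (some hidx)
    let alt_names := [['-'], [' '], ([] : List Char)].foldl (fun acc ch =>
      alt_sfxs.foldl (fun acc sfx =>
        let sfx' := if ch = [] ∧ PySem.Chars.islower (PySem.List.pyGetD pfx (-1) ' ') then
            PySem.Chars.lowerChar (PySem.List.pyGetD sfx 0 ' ') :: PySem.List.slice sfx (some 1) none
          else sfx
        acc ++ [pfx ++ ch ++ sfx']) acc) []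
    if is_sub = false ∧ PySem.List.pyGetD alt_names 0 [] = s then
      PySem.List.slice alt_names (some 1) none
    else alt_names
termination_by s.length
decreasing_by exact pvDrop_lt s h

def generate_alt_names (sttdized_name : String) (is_sub_call : Bool) : List String :=
  (pvGanA sttdized_name.toList is_sub_call).map String.ofList

-- ===== PORT B =====
-- the while-loop collecting split-point hyphen indices
def pvCollectSplits (s : List Char) (pos : Nat) : List Nat :=
  if h : PySem.Chars.findFrom s ['-'] (pos : Int) none < 0 ∨
      PySem.Chars.findFrom s ['-'] (pos : Int) none = PySem.Chars.len s - 1 then []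
  else (PySem.Chars.findFrom s ['-'] (pos : Int) none).toNat ::
    pvCollectSplits s ((PySem.Chars.findFrom s ['-'] (pos : Int) none).toNat + 2)
termination_by s.length + 2 - pos
decreasing_by exact pvSplit_step_lt s pos h

-- the for-loop building the list of segments
def pvSegs (s : List Char) (prev : Nat) : List Nat → List (List Char)
  | [] => [PySem.List.slice s (some (prev : Int)) none]
  | p :: ps => PySem.List.slice s (some (prev : Int)) (some (p : Int)) :: pvSegs s (p + 1) ps

-- itertools.product(['-',' ',''], repeat=n), leftmost factor most significant
def pvCombos : Nat → List (List (List Char))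
  | 0 => [[]]
  | n + 1 => [['-'], [' '], ([] : List Char)].flatMap (fun c => (pvCombos n).map (c :: ·))

-- the inner zip loop joining the remaining segments onto the accumulator
def pvTail : List Char → List (List Char) → List (List Char) → List Char
  | pc :: prevs', seg :: segs', j :: combo' =>
      let seg' := if j = [] ∧ PySem.Chars.islower pc then
          PySem.Chars.lowerChar (PySem.List.pyGetD seg 0 ' ') :: PySem.List.slice seg (some 1) none
        else seg
      j ++ seg' ++ pvTail prevs' segs' combo'
  | _, _, _ => []

def pvGanB (s : List Char) (is_sub : Bool) : List (List Char) :=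
  let splits := pvCollectSplits s 1
  if splits = [] then
    if is_sub then [s] else []
  else
    let segs := pvSegs s 0 splits
    let prevs := splits.map (fun (p : Nat) => PySem.List.pyGetD s ((p : Int) - 1) ' ')
    let alts := (pvCombos splits.length).map (fun combo =>
      segs.headD [] ++ pvTail prevs segs.tail combo)
    if is_sub then alts else PySem.List.slice alts (some 1) none

def generate_alt_names_alt (sttdized_name : String) (is_sub_call : Bool) : List String :=
  (pvGanB sttdized_name.toList is_sub_call).map String.ofList

-- ===== PRECONDITION & SPEC =====
def Spec_generate_alt_names (sttdized_name : String) (is_sub_call : Bool) (out : List String) : Prop := out = generate_alt_names_alt sttdized_name is_sub_call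
instance (sttdized_name : String) (is_sub_call : Bool) (out : List String) : Decidable (Spec_generate_alt_names sttdized_name is_sub_call out) := by unfold Spec_generate_alt_names; infer_instance

-- ===== CLAIM (what is proved, stated in full; the proofs are below) =====
def Claim_equal_generate_alt_names : Prop := ∀ (sttdized_name : String) (is_sub_call : Bool), Dom_generate_alt_names sttdized_name is_sub_call → Spec_generate_alt_names sttdized_name is_sub_call (generate_alt_names sttdized_name is_sub_call)

-- ===== LEMMAS AND PROOFS =====

-- every collected split index p satisfies pos ≤ p and p + 2 ≤ length
theorem pvCollectSplits_bounds (s : List Char) (pos : Nat) :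
    ∀ p ∈ pvCollectSplits s pos, pos ≤ p ∧ p + 2 ≤ s.length := by
  fun_induction pvCollectSplits s pos with
  | case1 pos h => simp
  | case2 pos h ih =>
    intro p hp
    rw [pvFindFrom_nat] at h
    split at h
    · simp at h
    · rename_i hf
      obtain ⟨h0, hlt, _⟩ := pvFind_spec _ hf
      rw [List.length_drop] at hlt
      push_neg at h
      rw [PySem.Chars.len_eq] at h
      rw [pvFindFrom_nat, if_neg hf] at hp ih
      rcases List.mem_cons.mp hp with rfl | hmem
      · constructor <;> omega
      · have := ih p hmem
        constructor <;> omega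

-- shifting the scan start past a prefix shifts the collected splits
theorem pvCollectSplits_shift (u t : List Char) (pos : Nat) :
    pvCollectSplits (u ++ t) (u.length + pos) = (pvCollectSplits t pos).map (· + u.length) := by
  fun_induction pvCollectSplits t pos with
  | case1 pos h =>
    rw [pvCollectSplits]
    rw [dif_pos]
    · simp
    · rw [pvFindFrom_nat] at h ⊢
      rw [List.drop_length_add_append, PySem.Chars.len_eq] at *
      split at h
      · rename_i hf; rw [if_pos hf]; left; norm_num
      · rename_i hf
        obtain ⟨h0, hlt, _⟩ := pvFind_spec _ hf
        rw [if_neg hf]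
        rcases h with h | h
        · omega
        · right; rw [List.length_append]; push_cast at h ⊢; omega
  | case2 pos h ih =>
    rw [pvCollectSplits]
    rw [pvFindFrom_nat] at h
    split at h
    · simp at h
    rename_i hf
    obtain ⟨h0, hlt, _⟩ := pvFind_spec _ hf
    rw [List.length_drop] at hlt
    push_neg at h
    rw [PySem.Chars.len_eq] at h
    rw [pvFindFrom_nat, if_neg hf] at ih
    rw [dif_neg]
    · simp only [pvFindFrom_nat, List.drop_length_add_append, if_neg hf, List.map_cons]
      congr 1
      · omega
      · rw [show (((u.length + pos : Nat) : Int) + PySem.Chars.find (t.drop pos) ['-']).toNat + 2 =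
          u.length + ((((pos : Nat) : Int) + PySem.Chars.find (t.drop pos) ['-']).toNat + 2) by omega]
        exact ih
    · rw [pvFindFrom_nat, List.drop_length_add_append, if_neg hf, PySem.Chars.len_eq, List.length_append]
      push_neg
      constructor
      · push_cast; omega
      · push_cast at h ⊢; omega

-- segments of shifted splits are segments of the dropped list
theorem pvSegs_shift (s : List Char) (off : Nat) (ps : List Nat) : ∀ (prev : Nat),
    pvSegs s (off + prev) (ps.map (· + off)) = pvSegs (s.drop off) prev ps := by
  induction ps with
  | nil =>
    intro prev
    simp only [List.map_nil, pvSegs, PySem.List.slice_from_natCast, List.drop_drop]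
  | cons p ps ih =>
    intro prev
    simp only [List.map_cons, pvSegs, PySem.List.slice_natCast, List.drop_drop]
    congr 1
    · rw [show p + off - (off + prev) = p - prev by omega]
    · rw [show p + off + 1 = off + (p + 1) by omega]
      exact ih (p + 1)

theorem pvCtx (s : List Char)
    (h : ¬ (PySem.Chars.findFrom s ['-'] 1 none < 0 ∨
      PySem.Chars.findFrom s ['-'] 1 none = PySem.Chars.len s - 1)) :
    ∃ m : Nat, PySem.Chars.findFrom s ['-'] 1 none = (m : Int) ∧ 1 ≤ m ∧ m + 2 ≤ s.length ∧
      s[m]? = some '-' ∧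
      PySem.List.slice s (some (PySem.Chars.findFrom s ['-'] 1 none + 1)) none = s.drop (m + 1) ∧
      PySem.List.slice s none (some (PySem.Chars.findFrom s ['-'] 1 none)) = s.take m ∧
      pvCollectSplits s 1 = m :: (pvCollectSplits (s.drop (m + 1)) 1).map (· + (m + 1)) := by
  have h1 : ((1:Nat) : Int) = (1 : Int) := by norm_num
  rw [← h1, pvFindFrom_nat] at h
  split at h
  · simp at h
  rename_i hf
  obtain ⟨h0, hlt, hat⟩ := pvFind_spec _ hf
  rw [List.length_drop] at hlt
  push_neg at h
  rw [PySem.Chars.len_eq] at h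
  refine ⟨1 + (PySem.Chars.find (s.drop 1) ['-']).toNat, ?_, by omega, by omega, ?_, ?_, ?_, ?_⟩
  · rw [← h1, pvFindFrom_nat, if_neg hf]; push_cast; omega
  · rw [List.getElem?_drop] at hat; exact hat
  · rw [← h1, pvFindFrom_nat, if_neg hf]
    rw [show ((1:Nat):Int) + PySem.Chars.find (s.drop 1) ['-'] + ((1:Nat):Int) =
      ((1 + (PySem.Chars.find (s.drop 1) ['-']).toNat + 1 : Nat) : Int) by push_cast; omega]
    exact PySem.List.slice_from_natCast s _
  · rw [← h1, pvFindFrom_nat, if_neg hf]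
    rw [show ((1:Nat):Int) + PySem.Chars.find (s.drop 1) ['-'] =
      ((1 + (PySem.Chars.find (s.drop 1) ['-']).toNat : Nat) : Int) by push_cast; omega]
    exact PySem.List.slice_to_natCast s _
  · set m : Nat := 1 + (PySem.Chars.find (s.drop 1) ['-']).toNat with hm
    have hcond : ¬ (PySem.Chars.findFrom s ['-'] (((1:Nat)) : Int) none < 0 ∨
        PySem.Chars.findFrom s ['-'] (((1:Nat)) : Int) none = PySem.Chars.len s - 1) := by
      rw [pvFindFrom_nat, if_neg hf]
      push_neg
      refine ⟨by push_cast; omega, ?_⟩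
      rw [PySem.Chars.len_eq]
      push_cast at h ⊢
      omega
    rw [pvCollectSplits, dif_neg hcond]
    congr 1
    · rw [pvFindFrom_nat, if_neg hf]; omega
    · have hlen : (s.take (m + 1)).length = m + 1 := by
        rw [List.length_take]; omega
      have harg : (PySem.Chars.findFrom s ['-'] ((1:Nat) : Int) none).toNat + 2 =
          (s.take (m + 1)).length + 1 := by
        rw [pvFindFrom_nat, if_neg hf, hlen]; omega
      rw [harg]
      calc pvCollectSplits s ((s.take (m + 1)).length + 1)
          = pvCollectSplits (s.take (m + 1) ++ s.drop (m + 1)) ((s.take (m + 1)).length + 1) := by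
            rw [List.take_append_drop]
        _ = (pvCollectSplits (s.drop (m + 1)) 1).map (· + (s.take (m + 1)).length) :=
            pvCollectSplits_shift _ _ 1
        _ = (pvCollectSplits (s.drop (m + 1)) 1).map (· + (m + 1)) := by rw [hlen]

-- unfolding pvGanA in the recursive case, foldl loops as flatMap/map
theorem pvGanA_rec (s : List Char)
    (h : ¬ (PySem.Chars.findFrom s ['-'] 1 none < 0 ∨
      PySem.Chars.findFrom s ['-'] 1 none = PySem.Chars.len s - 1)) :
    pvGanA s true = [['-'], [' '], ([] : List Char)].flatMap (fun ch =>
      (pvGanA (PySem.List.slice s (some (PySem.Chars.findFrom s ['-'] 1 none + 1)) none) true).map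
        (fun sfx =>
          PySem.List.slice s none (some (PySem.Chars.findFrom s ['-'] 1 none)) ++ ch ++
            (if ch = [] ∧ PySem.Chars.islower
                (PySem.List.pyGetD (PySem.List.slice s none (some (PySem.Chars.findFrom s ['-'] 1 none))) (-1) ' ') then
              PySem.Chars.lowerChar (PySem.List.pyGetD sfx 0 ' ') :: PySem.List.slice sfx (some 1) none
            else sfx))) := by
  conv_lhs => rw [pvGanA]
  rw [dif_neg h]
  simp only [PySem.List.foldl_append_singleton_eq_map, PySem.List.foldl_append_eq_flatMap]
  simp

-- top-level call: same list, then drop the first entry if it equals the input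
theorem pvGanA_false (s : List Char)
    (h : ¬ (PySem.Chars.findFrom s ['-'] 1 none < 0 ∨
      PySem.Chars.findFrom s ['-'] 1 none = PySem.Chars.len s - 1)) :
    pvGanA s false = if PySem.List.pyGetD (pvGanA s true) 0 [] = s then
      PySem.List.slice (pvGanA s true) (some 1) none else pvGanA s true := by
  conv_rhs => rw [pvGanA, dif_neg h]
  conv_lhs => rw [pvGanA]
  rw [dif_neg h]
  simp

-- the head of pvGanA s true is s itself
theorem pvGanA_sub_head (s : List Char) : (pvGanA s true).head? = some s := by
  by_cases h : (PySem.Chars.findFrom s ['-'] 1 none < 0 ∨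
      PySem.Chars.findFrom s ['-'] 1 none = PySem.Chars.len s - 1)
  · rw [pvGanA, dif_pos h]; rfl
  · obtain ⟨m, hm, hm1, hm2, hat, hsuf, hpfx, -⟩ := pvCtx s h
    rw [pvGanA_rec s h, hsuf, hpfx]
    have ih := pvGanA_sub_head (s.drop (m + 1))
    simp only [List.flatMap_cons, List.flatMap_nil, List.append_nil, List.head?_append,
      List.head?_map, ih]
    simp only [Option.map_some, Option.or_some, Option.getD_some]
    have hlt : m < s.length := by omega
    have hEl : s[m] = '-' := by
      rw [List.getElem?_eq_some_iff] at hat; exact hat.2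
    congr 1
    rw [if_neg (by simp)]
    rw [show s.take m ++ ['-'] ++ s.drop (m + 1) = s.take m ++ '-' :: s.drop (m + 1) by simp]
    rw [← hEl, List.getElem_cons_drop hlt, List.take_append_drop]
termination_by s.length
decreasing_by simp [List.length_drop]; omega

theorem pvGanB_sub (t : List Char) :
    pvGanB t true = (pvCombos (pvCollectSplits t 1).length).map (fun c =>
      (pvSegs t 0 (pvCollectSplits t 1)).headD [] ++
        pvTail ((pvCollectSplits t 1).map (fun (p : Nat) => PySem.List.pyGetD t ((p : Int) - 1) ' '))
          (pvSegs t 0 (pvCollectSplits t 1)).tail c) := by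
  rw [pvGanB]
  by_cases hsp : pvCollectSplits t 1 = []
  · rw [hsp]
    simp [pvCombos, pvSegs, pvTail]
  · simp only [if_neg hsp, reduceIte]

-- main lemma: the two cores agree on sub-calls
theorem pvGan_sub_eq (s : List Char) : pvGanA s true = pvGanB s true := by
  by_cases h : (PySem.Chars.findFrom s ['-'] 1 none < 0 ∨
      PySem.Chars.findFrom s ['-'] 1 none = PySem.Chars.len s - 1)
  · have hsp : pvCollectSplits s 1 = [] := by
      rw [pvCollectSplits, dif_pos (by simpa using h)]
    rw [pvGanA, dif_pos h, pvGanB]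
    simp [hsp]
  · obtain ⟨m, hm, hm1, hm2, hat, hsuf, hpfx, hsplits⟩ := pvCtx s h
    have ih := pvGan_sub_eq (s.drop (m + 1))
    rw [pvGanA_rec s h, hsuf, hpfx, ih, pvGanB_sub (s.drop (m + 1))]
    rw [pvGanB_sub s, hsplits]
    have hsegs : pvSegs s (m + 1) ((pvCollectSplits (s.drop (m + 1)) 1).map (· + (m + 1))) =
        pvSegs (s.drop (m + 1)) 0 (pvCollectSplits (s.drop (m + 1)) 1) := by
      have := pvSegs_shift s (m + 1) (pvCollectSplits (s.drop (m + 1)) 1) 0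
      simpa using this
    have hpc : PySem.List.pyGetD (s.take m) (-1) ' ' = PySem.List.pyGetD s ((m : Int) - 1) ' ' := by
      have hne : s.take m ≠ [] := by
        intro hnil
        have := congrArg List.length hnil
        rw [List.length_take, List.length_nil] at this
        omega
      rw [PySem.List.pyGetD_neg_one _ _ hne, List.getLast_eq_getElem,
        show ((m : Int) - 1) = ((m - 1 : Nat) : Int) by omega, PySem.List.pyGetD_natCast,
        List.getD_eq_getElem?_getD]
      have hml : m - 1 < s.length := by omega
      have h1 : (s.take m).length - 1 = m - 1 := by rw [List.length_take]; omega
      rw [List.getElem?_eq_getElem hml]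
      simp only [Option.getD_some, h1]
      exact List.getElem_take
    have hprevs : ((pvCollectSplits (s.drop (m + 1)) 1).map (· + (m + 1))).map
          (fun (p : Nat) => PySem.List.pyGetD s ((p : Int) - 1) ' ')
        = (pvCollectSplits (s.drop (m + 1)) 1).map
          (fun (q : Nat) => PySem.List.pyGetD (s.drop (m + 1)) ((q : Int) - 1) ' ') := by
      rw [List.map_map]
      apply List.map_congr_left
      intro q hq
      obtain ⟨hq1, hq2⟩ := pvCollectSplits_bounds _ _ q hq
      rw [List.length_drop] at hq2
      simp only [Function.comp]
      rw [show ((q + (m + 1) : Nat) : Int) - 1 = ((q + m : Nat) : Int) by push_cast; omega,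
        show ((q : Nat) : Int) - 1 = ((q - 1 : Nat) : Int) by omega,
        PySem.List.pyGetD_natCast, PySem.List.pyGetD_natCast,
        List.getD_eq_getElem?_getD, List.getD_eq_getElem?_getD, List.getElem?_drop,
        show m + 1 + (q - 1) = q + m by omega]
    have hshape : ∃ a t1 rest,
        pvSegs (s.drop (m + 1)) 0 (pvCollectSplits (s.drop (m + 1)) 1) = (a :: t1) :: rest := by
      have hlen : 1 ≤ (s.drop (m + 1)).length := by rw [List.length_drop]; omega
      cases hps : pvCollectSplits (s.drop (m + 1)) 1 with
      | nil =>
        cases hd : s.drop (m + 1) with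
        | nil => rw [hd] at hlen; simp at hlen
        | cons a t1 =>
          exact ⟨a, t1, [], by simp [pvSegs, hd]⟩
      | cons q qs =>
        obtain ⟨hq1, hq2⟩ := pvCollectSplits_bounds _ _ q (hps ▸ List.mem_cons_self)
        obtain ⟨k, rfl⟩ : ∃ k, q = k + 1 := ⟨q - 1, by omega⟩
        cases hd : s.drop (m + 1) with
        | nil => rw [hd] at hlen; simp at hlen
        | cons a t1 =>
          refine ⟨a, t1.take k, pvSegs (s.drop (m + 1)) (k + 1 + 1) qs, ?_⟩
          simp only [pvSegs]
          rw [PySem.List.slice_natCast]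
          simp [hd, List.take_succ_cons]
    obtain ⟨a, t1, rest, hsh⟩ := hshape
    simp only [List.length_cons, List.length_map, pvCombos, List.map_flatMap, List.map_map,
      pvSegs, List.headD_cons, List.tail_cons, hsegs, hsh, List.map_cons, hprevs, hpc,
      PySem.List.slice_natCast, Nat.sub_zero, List.drop_zero, List.take_zero,
      List.flatMap_cons, List.flatMap_nil, List.append_nil, List.map_append, List.map_map]
    congr 1
    · apply List.map_congr_left
      intro c' _
      simp [pvTail, Function.comp, List.append_assoc]
    congr 1
    · apply List.map_congr_left
      intro c' _
      simp [pvTail, Function.comp, List.append_assoc]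
    · apply List.map_congr_left
      intro c' _
      simp only [Function.comp, List.headD_cons, List.tail_cons, pvTail]
      by_cases hic : PySem.Chars.islower (PySem.List.pyGetD s ((m : Int) - 1) ' ') = true
      · simp [hic, pvTail, PySem.List.pyGetD_zero_cons, PySem.List.slice_from_one,
          List.append_assoc]
      · simp [hic, pvTail, List.append_assoc]
termination_by s.length
decreasing_by simp [List.length_drop]; omega

-- the two cores agree everywhere
theorem pvGan_eq (s : List Char) (b : Bool) : pvGanA s b = pvGanB s b := by
  cases b with
  | true => exact pvGan_sub_eq s
  | false =>
    have hBf : pvGanB s false = PySem.List.slice (pvGanB s true) (some 1) none := by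
      rw [pvGanB, pvGanB]
      by_cases hsp : pvCollectSplits s 1 = []
      · simp [hsp, PySem.List.slice_from_one]
      · simp [hsp]
    by_cases h : (PySem.Chars.findFrom s ['-'] 1 none < 0 ∨
        PySem.Chars.findFrom s ['-'] 1 none = PySem.Chars.len s - 1)
    · have hsp : pvCollectSplits s 1 = [] := by
        rw [pvCollectSplits, dif_pos (by simpa using h)]
      rw [pvGanA, dif_pos h, hBf, pvGanB]
      simp [hsp, PySem.List.slice_from_one]
    · rw [pvGanA_false s h, pvGan_sub_eq s, hBf]
      have hh := pvGanA_sub_head s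
      rw [pvGan_sub_eq s] at hh
      cases hL : pvGanB s true with
      | nil => rw [hL] at hh; simp at hh
      | cons x xs =>
        rw [hL] at hh
        simp only [List.head?_cons, Option.some.injEq] at hh
        rw [hh]
        simp [PySem.List.pyGetD_zero_cons]

-- ===== VERDICT (by name: the statement is the Claim_ definition above) =====
theorem generate_alt_names_spec : Claim_equal_generate_alt_names := by
  intro s b _
  unfold Spec_generate_alt_names generate_alt_names generate_alt_names_alt
  rw [pvGan_eq]
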